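-- pv_equiv track=rewrite | github.com/kkentia/JournAI | JournAI/backend/endpoints/sentiment_analysis.py | _iter_balanced_json_chunks
-- ===== SOURCE A (Python) =====
-- from typing import Any, List, Dict, Optional, Literal
--
-- def _iter_balanced_json_chunks(s: str):
--     stack: List[str] = []
--     start = None
--     for i, ch in enumerate(s):
--         if ch in "{[":
--             if not stack: start = i
--             stack.append(ch)
--         elif ch in "}]":
--             if stack:
--                 o = stack.pop()
--                 if ((o == "{" and ch == "}") or (o == "[" and ch == "]")) and not stack and start is not None:
--                     yield s[start:i + 1]; start = None
-- ===== SOURCE B (Python) =====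
-- def _iter_balanced_json_chunks(s: str):
--     i, n = 0, len(s)
--     while i < n:
--         ch = s[i]
--         if ch in "{[":
--             depth = 1
--             j = i + 1
--             while j < n and depth:
--                 c = s[j]
--                 if c in "{[":
--                     depth += 1
--                 elif c in "}]":
--                     depth -= 1
--                 j += 1
--             if depth == 0 and ((ch == "{" and s[j - 1] == "}") or (ch == "[" and s[j - 1] == "]")):
--                 yield s[i:j]
--             i = j
--         else:
--             i += 1
-- ===== Notes on version B (the rewrite author's own statement) =====
-- stated objective: alternative
-- what changed: Replaces the single-pass char-stack state machine with a chunk-at-a-time scanner: an outer loop skips to the next opening bracket, an inner loop counts nesting depth (no stack) to find the chunk's end, then the chunk is emitted iff its first and last brackets match.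
import Mathlib
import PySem

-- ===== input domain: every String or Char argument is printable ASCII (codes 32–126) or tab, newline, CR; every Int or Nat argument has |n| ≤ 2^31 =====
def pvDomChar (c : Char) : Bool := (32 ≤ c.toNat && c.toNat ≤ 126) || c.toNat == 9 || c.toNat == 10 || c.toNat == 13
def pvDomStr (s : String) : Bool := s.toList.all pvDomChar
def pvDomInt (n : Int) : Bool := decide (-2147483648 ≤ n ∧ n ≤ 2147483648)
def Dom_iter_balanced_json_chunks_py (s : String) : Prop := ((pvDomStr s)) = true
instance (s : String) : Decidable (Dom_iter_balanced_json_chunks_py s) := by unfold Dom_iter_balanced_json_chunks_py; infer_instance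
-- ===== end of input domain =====

-- ===== PORT A =====
-- B replaces A's char-stack single-pass state machine by a chunk-at-a-time scanner
-- (skip to an opening bracket, inner depth-counting scan, match first/last bracket);
-- same asymptotic cost, different structure (objective: alternative). Return value only (A is a generator).
def aStep (s : String) (st : List Char × Option Int × List String) (p : Int × Char) :
    List Char × Option Int × List String :=
  let stack := st.1
  let start := st.2.1
  let acc := st.2.2
  let i := p.1
  let ch := p.2
  if ch = '{' ∨ ch = '[' then
    (stack ++ [ch], (if stack = [] then some i else start), acc)
  else if ch = '}' ∨ ch = ']' then
    if h : stack ≠ [] then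
      let o := stack.getLast h
      let stack' := stack.dropLast
      if ((o = '{' ∧ ch = '}') ∨ (o = '[' ∧ ch = ']')) ∧ stack' = [] ∧ start.isSome then
        (stack', none, acc ++ [PySem.Str.slice s start (some (i + 1))])
      else
        (stack', start, acc)
    else
      (stack, start, acc)
  else
    (stack, start, acc)

def iter_balanced_json_chunks_py (s : String) : List String :=
  ((PySem.List.enumerate s.toList 0).foldl (aStep s) ([], none, [])).2.2

-- ===== PORT B =====
-- inner while loop of B: scan with a depth counter until depth returns to 0 (the chunk
-- accumulator `chunk` plays the role of the slice s[i:j]); returns the emitted chunk (if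
-- its brackets match) and the unconsumed suffix.
def bScan (o : Char) (chunk : List Char) (depth : Int) : List Char → Option (List Char) × List Char
  | [] => (none, [])
  | c :: rest =>
    let depth' := if c = '{' ∨ c = '[' then depth + 1
                  else if c = '}' ∨ c = ']' then depth - 1
                  else depth
    if depth' = 0 then
      (if (o = '{' ∧ c = '}') ∨ (o = '[' ∧ c = ']') then some (chunk ++ [c]) else none, rest)
    else
      bScan o (chunk ++ [c]) depth' rest

theorem bScan_len_le (o : Char) : ∀ (l : List Char) (chunk : List Char) (depth : Int),
    (bScan o chunk depth l).2.length ≤ l.length := by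
  intro l
  induction l with
  | nil => intro chunk depth; simp [bScan]
  | cons c rest ih =>
    intro chunk depth
    simp only [bScan]
    by_cases h0 : (if c = '{' ∨ c = '[' then depth + 1 else if c = '}' ∨ c = ']' then depth - 1 else depth) = 0
    · simp only [if_pos h0]; simp
    · simp only [if_neg h0]; exact le_trans (ih _ _) (by simp)

-- outer while loop of B: skip to the next opening bracket, run the inner scan, emit.
def bMain : List Char → List String
  | [] => []
  | c :: rest =>
    if c = '{' ∨ c = '[' then
      match hm : bScan c [c] 1 rest with
      | (some chunk, rest') => String.ofList chunk :: bMain rest'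
      | (none, rest') => bMain rest'
    else
      bMain rest
termination_by l => l.length
decreasing_by
  · have h := bScan_len_le c rest [c] 1
    rw [hm] at h
    simpa using Nat.lt_succ_of_le h
  · have h := bScan_len_le c rest [c] 1
    rw [hm] at h
    simpa using Nat.lt_succ_of_le h
  · simp

def iter_balanced_json_chunks_py_alt (s : String) : List String :=
  bMain s.toList

-- ===== PRECONDITION & SPEC =====
def Spec_iter_balanced_json_chunks_py (s : String) (out : List String) : Prop := out = iter_balanced_json_chunks_py_alt s
instance (s : String) (out : List String) : Decidable (Spec_iter_balanced_json_chunks_py s out) := by unfold Spec_iter_balanced_json_chunks_py; infer_instance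

-- ===== CLAIM (what is proved, stated in full; the proofs are below) =====
def Claim_equal_iter_balanced_json_chunks_py : Prop := ∀ (s : String), Dom_iter_balanced_json_chunks_py s → Spec_iter_balanced_json_chunks_py s (iter_balanced_json_chunks_py s)

-- ===== LEMMAS AND PROOFS =====

-- stepping lemmas: what one aStep does in each of the cases of A's loop body
theorem aStep_open (s : String) (i : Int) (ch : Char) (stack : List Char)
    (start : Option Int) (acc : List String) (h : ch = '{' ∨ ch = '[') :
    aStep s (stack, start, acc) (i, ch)
      = (stack ++ [ch], (if stack = [] then some i else start), acc) := by
  simp only [aStep]; rw [if_pos h]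

theorem aStep_close_nil (s : String) (i : Int) (ch : Char)
    (start : Option Int) (acc : List String)
    (h1 : ¬(ch = '{' ∨ ch = '[')) (h2 : ch = '}' ∨ ch = ']') :
    aStep s ([], start, acc) (i, ch) = ([], start, acc) := by
  simp only [aStep]; rw [if_neg h1, if_pos h2]; simp

theorem aStep_close_one_match (s : String) (i : Int) (ch o : Char) (st : Int)
    (acc : List String)
    (h1 : ¬(ch = '{' ∨ ch = '[')) (h2 : ch = '}' ∨ ch = ']')
    (hm : (o = '{' ∧ ch = '}') ∨ (o = '[' ∧ ch = ']')) :
    aStep s ([o], some st, acc) (i, ch)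
      = ([], none, acc ++ [PySem.Str.slice s (some st) (some (i + 1))]) := by
  simp only [aStep]; rw [if_neg h1, if_pos h2]; simp [hm]

theorem aStep_close_one_mismatch (s : String) (i : Int) (ch o : Char)
    (start : Option Int) (acc : List String)
    (h1 : ¬(ch = '{' ∨ ch = '[')) (h2 : ch = '}' ∨ ch = ']')
    (hm : ¬((o = '{' ∧ ch = '}') ∨ (o = '[' ∧ ch = ']'))) :
    aStep s ([o], start, acc) (i, ch) = ([], start, acc) := by
  simp only [aStep]; rw [if_neg h1, if_pos h2]; simp [hm]

theorem aStep_close_big (s : String) (i : Int) (ch : Char) (stack : List Char)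
    (start : Option Int) (acc : List String)
    (h1 : ¬(ch = '{' ∨ ch = '[')) (h2 : ch = '}' ∨ ch = ']')
    (hne : stack ≠ []) (hbig : stack.dropLast ≠ []) :
    aStep s (stack, start, acc) (i, ch) = (stack.dropLast, start, acc) := by
  simp only [aStep]; rw [if_neg h1, if_pos h2]; simp [hne, hbig]

theorem aStep_other (s : String) (i : Int) (ch : Char) (stack : List Char)
    (start : Option Int) (acc : List String)
    (h1 : ¬(ch = '{' ∨ ch = '[')) (h2 : ¬(ch = '}' ∨ ch = ']')) :
    aStep s (stack, start, acc) (i, ch) = (stack, start, acc) := by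
  simp only [aStep]; rw [if_neg h1, if_neg h2]

-- the chunk A slices out at a matched close equals the chunk B accumulated
theorem slice_eq_chunk (s : String) (pre rest : List Char) (c : Char) (st : Nat)
    (hsp : s.toList = pre ++ c :: rest) (hst : st ≤ pre.length) :
    PySem.Str.slice s (some (st : Int)) (some ((pre.length : Int) + 1))
      = String.ofList (pre.drop st ++ [c]) := by
  have hcast : ((pre.length : Int) + 1) = ((pre.length + 1 : Nat) : Int) := by push_cast; ring
  rw [hcast]
  simp only [PySem.Str.slice, pysem, hsp]
  congr 1
  rw [List.drop_append_of_le_length hst]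
  rw [List.take_append]
  have hlen : (pre.drop st).length = pre.length - st := by simp
  rw [List.take_of_length_le (by omega)]
  congr 1
  have : pre.length + 1 - st - (pre.drop st).length = 1 := by omega
  rw [this]; rfl

-- Combined invariant, by strong induction on the length of the unprocessed suffix `rest`:
-- (outer) from an empty stack, A's fold appends exactly bMain rest to the accumulator,
--         whatever the leftover `start` is (a stale `start` is never read at top level);
-- (inner) inside a chunk, A's stack is abstracted by its length (= B's depth counter) and
--         its bottom element o (= B's remembered opening bracket); the chunk slice built
--         so far is pre.drop st, and A's fold continues exactly as bScan followed by bMain.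
theorem mainInv (s : String) : ∀ (n : Nat) (rest pre : List Char), s.toList = pre ++ rest → rest.length ≤ n →
    ((∀ (start : Option Int) (acc : List String),
       ((PySem.List.enumerate rest (pre.length : Int)).foldl (aStep s) ([], start, acc)).2.2
         = acc ++ bMain rest)
     ∧ (∀ (stack : List Char) (o : Char) (st : Nat) (acc : List String),
         stack.head? = some o → st ≤ pre.length →
         ((PySem.List.enumerate rest (pre.length : Int)).foldl (aStep s) (stack, some (st : Int), acc)).2.2
           = match bScan o (pre.drop st) (stack.length : Int) rest with
             | (some chunk, rest') => (acc ++ [String.ofList chunk]) ++ bMain rest'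
             | (none, rest') => acc ++ bMain rest')) := by
  intro n
  induction n with
  | zero =>
    intro rest pre hsp hlen
    have hrest : rest = [] := List.length_eq_zero_iff.mp (Nat.le_zero.mp hlen)
    subst hrest
    constructor
    · intro start acc; simp [PySem.List.enumerate, bMain]
    · intro stack o st acc hhead hst; simp [PySem.List.enumerate, bScan, bMain]
  | succ n ih =>
    intro rest pre hsp hlen
    cases rest with
    | nil =>
      constructor
      · intro start acc; simp [PySem.List.enumerate, bMain]
      · intro stack o st acc hhead hst; simp [PySem.List.enumerate, bScan, bMain]
    | cons c rest₂ =>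
      have hsp' : s.toList = (pre ++ [c]) ++ rest₂ := by rw [hsp]; simp
      have hlen' : rest₂.length ≤ n := by simp at hlen; omega
      have hplen : ((pre ++ [c]).length : Int) = (pre.length : Int) + 1 := by
        simp
      have henum : PySem.List.enumerate (c :: rest₂) (pre.length : Int)
          = ((pre.length : Int), c) :: PySem.List.enumerate rest₂ ((pre ++ [c]).length : Int) := by
        rw [PySem.List.enumerate_cons, hplen]
      constructor
      · -- outer: stack empty
        intro start acc
        rw [henum, List.foldl_cons]
        by_cases hc : c = '{' ∨ c = '['
        · rw [aStep_open s _ c [] start acc hc]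
          simp only [List.nil_append]
          rw [if_pos trivial]
          have hin := (ih rest₂ (pre ++ [c]) hsp' hlen').2 [c] c pre.length acc
            (by simp) (by simp)
          norm_num at hin
          rw [hplen, hin]
          have hbm : bMain (c :: rest₂)
              = (match bScan c [c] 1 rest₂ with
                  | (some chunk, rest') => String.ofList chunk :: bMain rest'
                  | (none, rest') => bMain rest') := by
            rw [bMain]; rw [if_pos hc]
            rcases hb : bScan c [c] 1 rest₂ with ⟨res, rest'⟩
            rcases res with _ | chunk <;> simp [hb]
          rw [hbm]
          rcases hscan : bScan c [c] 1 rest₂ with ⟨res, rest'⟩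
          rcases res with _ | chunk <;> simp [hscan]
        · have hbm : bMain (c :: rest₂) = bMain rest₂ := by rw [bMain]; rw [if_neg hc]
          by_cases hd : c = '}' ∨ c = ']'
          · rw [aStep_close_nil s _ c start acc hc hd]
            rw [(ih rest₂ (pre ++ [c]) hsp' hlen').1 start acc, hbm]
          · rw [aStep_other s _ c [] start acc hc hd]
            rw [(ih rest₂ (pre ++ [c]) hsp' hlen').1 start acc, hbm]
      · -- inner: stack nonempty with bottom o
        intro stack o st acc hhead hst
        have hstkne : stack ≠ [] := by intro h; rw [h] at hhead; simp at hhead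
        have hst' : st ≤ (pre ++ [c]).length := by simp; omega
        have hdrop' : (pre ++ [c]).drop st = pre.drop st ++ [c] :=
          List.drop_append_of_le_length hst
        rw [henum, List.foldl_cons]
        by_cases hc : c = '{' ∨ c = '['
        · -- opening: push / depth + 1
          rw [aStep_open s _ c stack (some (st : Int)) acc hc]
          rw [if_neg hstkne]
          have hin := (ih rest₂ (pre ++ [c]) hsp' hlen').2 (stack ++ [c]) o st acc
            (by rw [List.head?_append_of_ne_nil _ hstkne]; exact hhead) hst'
          rw [hdrop'] at hin
          rw [hin]
          have hscan : bScan o (pre.drop st) (stack.length : Int) (c :: rest₂)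
              = bScan o (pre.drop st ++ [c]) ((stack ++ [c]).length : Int) rest₂ := by
            rw [bScan]
            rw [if_pos hc]
            rw [if_neg (by push_cast; omega)]
            congr 1
            simp only [List.length_append, List.length_cons, List.length_nil]
            push_cast; omega
          rw [hscan]
        · by_cases hd : c = '}' ∨ c = ']'
          · -- closing: pop / depth - 1
            by_cases h1 : stack.length = 1
            · -- the popped bracket is the bottom one; the chunk may be emitted
              have hstack : stack = [o] := by
                cases stack with
                | nil => simp at hhead
                | cons a t =>
                  simp at h1 hhead
                  simp [h1, hhead]
              subst hstack
              have hscan : bScan o (pre.drop st) (([o].length : Nat) : Int) (c :: rest₂)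
                  = (if (o = '{' ∧ c = '}') ∨ (o = '[' ∧ c = ']')
                      then some (pre.drop st ++ [c]) else none, rest₂) := by
                rw [bScan]
                rw [if_neg hc, if_pos hd]
                norm_num
              by_cases hmt : (o = '{' ∧ c = '}') ∨ (o = '[' ∧ c = ']')
              · rw [aStep_close_one_match s _ c o (st : Int) acc hc hd hmt]
                rw [(ih rest₂ (pre ++ [c]) hsp' hlen').1 none
                  (acc ++ [PySem.Str.slice s (some (st : Int)) (some ((pre.length : Int) + 1))])]
                rw [hscan, if_pos hmt]
                rw [slice_eq_chunk s pre rest₂ c st hsp hst]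
              · rw [aStep_close_one_mismatch s _ c o (some (st : Int)) acc hc hd hmt]
                rw [(ih rest₂ (pre ++ [c]) hsp' hlen').1 (some (st : Int)) acc]
                rw [hscan, if_neg hmt]
            · -- deeper pop: the stack stays nonempty and keeps its bottom element
              have h2 : 2 ≤ stack.length := by
                have : stack.length ≠ 0 := by simpa using hstkne
                omega
              have hbig : stack.dropLast ≠ [] := by
                have : stack.dropLast.length = stack.length - 1 := by simp
                intro h; rw [h] at this; simp at this; omega
              rw [aStep_close_big s _ c stack (some (st : Int)) acc hc hd hstkne hbig]
              have hheadd : stack.dropLast.head? = some o := by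
                cases stack with
                | nil => simp at hhead
                | cons a t =>
                  have htne : t ≠ [] := by
                    intro h; rw [h] at h2; simp at h2
                  rw [List.dropLast_cons_of_ne_nil htne]
                  simpa using hhead
              have hin := (ih rest₂ (pre ++ [c]) hsp' hlen').2 stack.dropLast o st acc hheadd hst'
              rw [hdrop'] at hin
              rw [hin]
              have hscan : bScan o (pre.drop st) (stack.length : Int) (c :: rest₂)
                  = bScan o (pre.drop st ++ [c]) (stack.dropLast.length : Int) rest₂ := by
                rw [bScan]
                rw [if_neg hc, if_pos hd]
                rw [if_neg (by rw [List.length_dropLast] at *; push_cast; omega)]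
                congr 1
                rw [List.length_dropLast]; push_cast; omega
              rw [hscan]
          · -- other char: no state change / depth unchanged
            rw [aStep_other s _ c stack (some (st : Int)) acc hc hd]
            have hin := (ih rest₂ (pre ++ [c]) hsp' hlen').2 stack o st acc hhead hst'
            rw [hdrop'] at hin
            rw [hin]
            have hscan : bScan o (pre.drop st) (stack.length : Int) (c :: rest₂)
                = bScan o (pre.drop st ++ [c]) (stack.length : Int) rest₂ := by
              rw [bScan]
              rw [if_neg hc, if_neg hd]
              rw [if_neg (by push_cast; simpa using hstkne)]
            rw [hscan]
-- ===== VERDICT (by name: the statement is the Claim_ definition above) =====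
theorem iter_balanced_json_chunks_py_spec : Claim_equal_iter_balanced_json_chunks_py := by
  intro s _
  unfold Spec_iter_balanced_json_chunks_py iter_balanced_json_chunks_py iter_balanced_json_chunks_py_alt
  have h := (mainInv s s.toList.length s.toList [] (by simp) (by simp)).1 none []
  simpa using h
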